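-- pv_equiv track=rewrite | github.com/madushajg/SpamHamIdentifier | ReadTSV/pp.py | find_bigrams
-- ===== SOURCE A (Python) =====
-- from itertools import tee, islice
--
-- def find_bigrams(tokenlist):
--     n = 2
--     tlist = tokenlist
--     while True:
--         a, b = tee(tlist)
--         l = tuple(islice(a, n))
--         if len(l) == n:
--             yield l
--             next(b)
--             tlist = b
--         else:
--             break
-- ===== SOURCE B (Python) =====
-- def find_bigrams(tokenlist):
--     has_prev = False
--     prev = None
--     for tok in tokenlist:
--         if has_prev:
--             yield (prev, tok)
--         prev = tok
--         has_prev = True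
-- ===== Notes on version B (the rewrite author's own statement) =====
-- stated objective: simpler
-- what changed: Replaces the tee/islice window machinery with a single forward pass that remembers only the previous token and yields (prev, tok) pairs.
import Mathlib
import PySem

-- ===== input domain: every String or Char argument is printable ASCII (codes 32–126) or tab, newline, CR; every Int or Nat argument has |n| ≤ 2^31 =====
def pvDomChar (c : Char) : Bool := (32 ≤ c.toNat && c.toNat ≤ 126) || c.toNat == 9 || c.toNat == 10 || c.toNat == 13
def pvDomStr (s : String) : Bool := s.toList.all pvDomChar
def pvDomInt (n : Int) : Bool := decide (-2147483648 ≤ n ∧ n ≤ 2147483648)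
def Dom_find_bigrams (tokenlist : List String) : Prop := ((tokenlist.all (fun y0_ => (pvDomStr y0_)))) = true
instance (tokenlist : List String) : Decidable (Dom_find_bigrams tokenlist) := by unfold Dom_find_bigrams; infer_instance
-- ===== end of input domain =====

-- ===== PORT A =====
-- A takes consecutive pairs by repeatedly slicing a 2-window off the front and advancing by one.
def find_bigrams (tokenlist : List String) : List (List String) :=
  match tokenlist with
  | a :: b :: rest => [a, b] :: find_bigrams (b :: rest)
  | _ => []

-- ===== PORT B =====
-- B: one forward pass keeping only the previous token (prev-tracking loop from Source B).
def find_bigrams_alt_loop (st : Option String × List (List String)) (tok : String) :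
    Option String × List (List String) :=
  match st.1 with
  | some p => (some tok, st.2 ++ [[p, tok]])
  | none => (some tok, st.2)

def find_bigrams_alt (tokenlist : List String) : List (List String) :=
  (tokenlist.foldl find_bigrams_alt_loop (none, [])).2

-- ===== PRECONDITION & SPEC =====
def Spec_find_bigrams (tokenlist : List String) (out : List (List String)) : Prop := out = find_bigrams_alt tokenlist
instance (tokenlist : List String) (out : List (List String)) : Decidable (Spec_find_bigrams tokenlist out) := by unfold Spec_find_bigrams; infer_instance

-- ===== CLAIM (what is proved, stated in full; the proofs are below) =====
def Claim_equal_find_bigrams : Prop := ∀ (tokenlist : List String), Dom_find_bigrams tokenlist → Spec_find_bigrams tokenlist (find_bigrams tokenlist)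

-- ===== LEMMAS AND PROOFS =====
lemma find_bigrams_alt_loop_inv (l : List String) (p : String) (acc : List (List String)) :
    (l.foldl find_bigrams_alt_loop (some p, acc)).2 = acc ++ find_bigrams (p :: l) := by
  induction l generalizing p acc with
  | nil => simp [find_bigrams]
  | cons t rest ih =>
      simp only [List.foldl_cons, find_bigrams_alt_loop, find_bigrams, ih, List.append_assoc,
        List.singleton_append]

-- ===== VERDICT (by name: the statement is the Claim_ definition above) =====
theorem find_bigrams_spec : Claim_equal_find_bigrams := by
  intro tokenlist _
  unfold Spec_find_bigrams find_bigrams_alt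
  cases tokenlist with
  | nil => rfl
  | cons t rest =>
      simp [find_bigrams_alt_loop, find_bigrams_alt_loop_inv rest t []]
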